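-- pv_equiv track=rewrite | github.com/VictorGarciaAlonso/AdventoOfC2020 | puzzle14.py | modify_mask
-- ===== SOURCE A (Python) =====
-- def find_mask_Bits(mask):
--     return [i for i, j in enumerate(mask) if j == "X"]
--
-- def modify_mask(mask,iter_item):
--     count = 0
--     temp_mask = list(mask)
--     for item in find_mask_Bits(mask):
--         temp_mask[item] = iter_item[count]
--         count += 1
--     temp_mask = "".join(temp_mask)
--     return(temp_mask)
-- ===== SOURCE B (Python) =====
-- def modify_mask(mask, iter_item):
--     # One pass over mask: replace each 'X' with the next character of iter_item.
--     out = []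
--     count = 0
--     for c in mask:
--         if c == "X":
--             out.append(iter_item[count])
--             count += 1
--         else:
--             out.append(c)
--     return "".join(out)
-- ===== Notes on version B (the rewrite author's own statement) =====
-- stated objective: simpler
-- what changed: Single pass over mask with a running counter replaces A's separate index-collecting pass (enumerate+filter) followed by a fold that mutates a list copy at those indices.
import Mathlib
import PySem

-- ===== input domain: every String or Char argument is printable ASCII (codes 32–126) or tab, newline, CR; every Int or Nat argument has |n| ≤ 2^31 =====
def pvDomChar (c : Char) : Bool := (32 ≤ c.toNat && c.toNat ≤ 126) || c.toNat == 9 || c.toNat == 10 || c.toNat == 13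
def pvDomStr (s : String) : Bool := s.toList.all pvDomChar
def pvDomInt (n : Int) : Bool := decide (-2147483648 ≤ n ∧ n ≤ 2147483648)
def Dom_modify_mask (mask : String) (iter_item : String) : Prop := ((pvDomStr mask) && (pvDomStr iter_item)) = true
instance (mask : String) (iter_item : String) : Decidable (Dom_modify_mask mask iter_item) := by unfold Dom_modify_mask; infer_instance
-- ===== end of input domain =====

-- B replaces A's two-pass (collect 'X' indices, then mutate a list copy at those indices)
-- with a single left-to-right pass carrying a counter; simpler, same cost.

-- ===== PORT A =====
-- [i for i, j in enumerate(mask) if j == "X"]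
def find_mask_Bits (mask : List Char) : List Int :=
  ((PySem.List.enumerate mask 0).filter (fun p => p.2 == 'X')).map (fun p => p.1)

def modify_mask (mask : String) (iter_item : String) : String :=
  let temp_mask := mask.toList
  let res := (find_mask_Bits mask.toList).foldl
    (fun (st : List Char × Int) item =>
      -- temp_mask[item] = iter_item[count]; item comes from enumerate, hence a valid
      -- nonnegative index, so List.set item.toNat is exact here. iter_item[count] is
      -- pyGet?; inside Pre_ it is always some, the default ' ' is never read.
      (st.1.set item.toNat ((PySem.List.pyGet? iter_item.toList st.2).getD ' '), st.2 + 1))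
    (temp_mask, 0)
  String.ofList res.1

-- ===== PORT B =====
def modify_mask_alt (mask : String) (iter_item : String) : String :=
  let res := mask.toList.foldl
    (fun (st : List Char × Int) c =>
      if c == 'X'
      then (st.1 ++ [(PySem.List.pyGet? iter_item.toList st.2).getD ' '], st.2 + 1)
      else (st.1 ++ [c], st.2))
    ([], 0)
  String.ofList res.1

-- ===== PRECONDITION & SPEC =====
-- Pre_ excludes exactly the inputs where Python A raises IndexError:
-- mask containing more 'X' characters than iter_item has characters.
def Pre_modify_mask (mask : String) (iter_item : String) : Prop :=
  mask.toList.count 'X' ≤ iter_item.toList.length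
instance (mask : String) (iter_item : String) : Decidable (Pre_modify_mask mask iter_item) := by
  unfold Pre_modify_mask; infer_instance

def pvWitness_modify_mask : String × String := ("X0X1X", "101")

def Spec_modify_mask (mask : String) (iter_item : String) (out : String) : Prop := out = modify_mask_alt mask iter_item
instance (mask : String) (iter_item : String) (out : String) : Decidable (Spec_modify_mask mask iter_item out) := by unfold Spec_modify_mask; infer_instance

-- ===== CLAIM (what is proved, stated in full; the proofs are below) =====
def Claim_equal_modify_mask : Prop := ∀ (mask : String) (iter_item : String), Dom_modify_mask mask iter_item → Pre_modify_mask mask iter_item → Spec_modify_mask mask iter_item (modify_mask mask iter_item)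

-- ===== LEMMAS AND PROOFS =====

-- common reference function: replace the 'X's of cs by s[k], s[k+1], …
def pvRep (s : List Char) : List Char → Int → List Char
  | [], _ => []
  | c :: cs, k =>
    if c == 'X' then ((PySem.List.pyGet? s k).getD ' ') :: pvRep s cs (k + 1)
    else c :: pvRep s cs k

-- the 'X' indices, with enumerate start made explicit
lemma pv_bits_cons (c : Char) (cs : List Char) (t : Int) :
    ((PySem.List.enumerate (c :: cs) t).filter (fun p => p.2 == 'X')).map (fun p => p.1)
      = (if c == 'X' then [t] else [])
        ++ ((PySem.List.enumerate cs (t + 1)).filter (fun p => p.2 == 'X')).map (fun p => p.1) := by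
  rw [PySem.List.enumerate_cons]
  by_cases h : c = 'X' <;> simp [h]

lemma pv_bits_shift (cs : List Char) (t : Int) :
    ((PySem.List.enumerate cs (t + 1)).filter (fun p => p.2 == 'X')).map (fun p => p.1)
      = (((PySem.List.enumerate cs t).filter (fun p => p.2 == 'X')).map (fun p => p.1)).map (· + 1) := by
  induction cs generalizing t with
  | nil => simp [PySem.List.enumerate_nil]
  | cons c cs ih =>
      rw [pv_bits_cons, pv_bits_cons]
      by_cases h : c = 'X' <;> simp [h, ih (t + 1), ih t]

lemma pv_bits_nonneg (cs : List Char) (t : Int) (i : Int)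
    (h : i ∈ ((PySem.List.enumerate cs t).filter (fun p => p.2 == 'X')).map (fun p => p.1)) :
    t ≤ i := by
  induction cs generalizing t with
  | nil => simp [PySem.List.enumerate_nil] at h
  | cons c cs ih =>
      rw [pv_bits_cons] at h
      rcases List.mem_append.1 h with h1 | h2
      · by_cases hc : c = 'X' <;> simp [hc] at h1; omega
      · have := ih (t + 1) h2; omega

-- folding A's set-step over indices all ≥ 1 + … skips a head element
lemma pv_fold_shift (s : List Char) (bs : List Int) (hb : ∀ i ∈ bs, 0 ≤ i)
    (a : Char) (l : List Char) (k : Int) :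
    (bs.map (· + 1)).foldl
      (fun (st : List Char × Int) item =>
        (st.1.set item.toNat ((PySem.List.pyGet? s st.2).getD ' '), st.2 + 1)) (a :: l, k)
    = (fun (p : List Char × Int) => (a :: p.1, p.2))
        (bs.foldl
          (fun (st : List Char × Int) item =>
            (st.1.set item.toNat ((PySem.List.pyGet? s st.2).getD ' '), st.2 + 1)) (l, k)) := by
  induction bs generalizing l k with
  | nil => simp
  | cons b bs ih =>
      have hb0 : 0 ≤ b := hb b (List.mem_cons_self ..)
      have hset : (b + 1).toNat = b.toNat + 1 := by omega
      simp only [List.map_cons, List.foldl_cons, hset, List.set]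
      exact ih (fun i hi => hb i (List.mem_cons_of_mem _ hi)) _ _

lemma pv_A_main (s : List Char) (cs : List Char) (k : Int) :
    ((((PySem.List.enumerate cs 0).filter (fun p => p.2 == 'X')).map (fun p => p.1)).foldl
      (fun (st : List Char × Int) item =>
        (st.1.set item.toNat ((PySem.List.pyGet? s st.2).getD ' '), st.2 + 1)) (cs, k)).1
    = pvRep s cs k := by
  induction cs generalizing k with
  | nil => simp [PySem.List.enumerate_nil, pvRep]
  | cons c cs ih =>
      rw [pv_bits_cons]
      simp only [zero_add]
      have hsh := pv_bits_shift cs 0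
      norm_num at hsh
      rw [hsh, ← List.map_map]
      by_cases h : c = 'X'
      · simp only [h, beq_self_eq_true, if_pos, List.singleton_append, List.foldl_cons,
          Int.toNat_zero, List.set_cons_zero]
        rw [pv_fold_shift s _ (pv_bits_nonneg cs 0)]
        simp [pvRep, ih]
      · simp only [show (c == 'X') = false by simp [h], Bool.false_eq_true, if_false,
          List.nil_append]
        rw [pv_fold_shift s _ (pv_bits_nonneg cs 0)]
        simp [pvRep, h, ih]

lemma pv_B_main (s : List Char) (cs : List Char) (acc : List Char) (k : Int) :
    (cs.foldl
      (fun (st : List Char × Int) c =>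
        if c == 'X'
        then (st.1 ++ [(PySem.List.pyGet? s st.2).getD ' '], st.2 + 1)
        else (st.1 ++ [c], st.2)) (acc, k)).1
    = acc ++ pvRep s cs k := by
  induction cs generalizing acc k with
  | nil => simp [pvRep]
  | cons c cs ih =>
      simp only [List.foldl_cons]
      by_cases h : c = 'X'
      · rw [if_pos (by simp [h]), ih]
        simp [pvRep, h]
      · rw [if_neg (by simp [h]), ih]
        simp [pvRep, h]

-- ===== VERDICT (by name: the statement is the Claim_ definition above) =====
theorem modify_mask_spec : Claim_equal_modify_mask := by
  intro mask iter_item _ _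
  show modify_mask mask iter_item = modify_mask_alt mask iter_item
  simp only [modify_mask, modify_mask_alt, find_mask_Bits, pv_A_main, pv_B_main,
    List.nil_append]
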